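-- pv_equiv track=rewrite | github.com/shaheming/leecode | link_node.py | check
-- ===== SOURCE A (Python) =====
-- class Node:
--     def __init__(self, v=None, next_node=None):
--         self.value = v
--         self.next_node = next_node
--
-- def check(s):
--     head = Node()
--     tail = head
--     cur = tail
--     for ch in s:
--         if ch == "[":
--             cur = head
--             continue
--         elif ch == "]":
--             cur = tail
--             continue
--         node = Node(ch, cur.next_node)
--         cur.next_node = node
--         if cur == tail:
--             tail = node
--         cur = node
--     l = []
--     c = head.next_node
--     while c:
--         l.append(c.value)
--         c = c.next_node
--     return "".join(l)
-- ===== SOURCE B (Python) =====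
-- def check(s):
--     lst = []
--     i = 0
--     for ch in s:
--         if ch == "[":
--             i = 0
--         elif ch == "]":
--             i = len(lst)
--         else:
--             lst.insert(i, ch)
--             i += 1
--     return "".join(lst)
-- ===== Notes on version B (the rewrite author's own statement) =====
-- stated objective: simpler
-- what changed: B replaces A's dummy-head mutable linked list with cursor/tail node bookkeeping and a final node-walk by a flat Python list plus an integer insertion index, joined at the end.
import Mathlib
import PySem

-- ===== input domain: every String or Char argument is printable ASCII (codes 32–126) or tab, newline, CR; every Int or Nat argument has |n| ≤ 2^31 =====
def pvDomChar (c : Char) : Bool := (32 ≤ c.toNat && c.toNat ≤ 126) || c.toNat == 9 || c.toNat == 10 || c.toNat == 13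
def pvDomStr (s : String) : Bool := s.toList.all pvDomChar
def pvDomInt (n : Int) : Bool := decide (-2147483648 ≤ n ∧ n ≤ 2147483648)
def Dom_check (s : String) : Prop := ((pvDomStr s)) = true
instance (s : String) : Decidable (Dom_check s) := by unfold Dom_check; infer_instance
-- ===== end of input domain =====

-- B replaces A's dummy-head mutable linked list (and its final node walk) by a flat
-- list with an integer insertion index; objective: simpler, same observable result.

-- ===== PORT A =====
-- A mutates a heap of Node objects; the port models the heap explicitly:
-- nodes are identified by allocation index (0 = the dummy head), with
-- `val`/`nxt` the value and next-pointer fields and `size` the next fresh index.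
-- State: (val, nxt, size, tail, cur); node identity `cur == tail` is index equality.
def checkStep :
    ((Nat → Option Char) × (Nat → Option Nat) × Nat × Nat × Nat) → Char →
    ((Nat → Option Char) × (Nat → Option Nat) × Nat × Nat × Nat)
  | (val, nxt, size, tail, cur), ch =>
    if ch = '[' then (val, nxt, size, tail, 0)
    else if ch = ']' then (val, nxt, size, tail, tail)
    else
      let n := size
      -- node = Node(ch, cur.next_node); cur.next_node = node
      let nxt' := fun j => if j = n then nxt cur else if j = cur then some n else nxt j
      let val' := fun j => if j = n then some ch else val j
      (val', nxt', n + 1, if cur = tail then n else tail, n)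

-- the final `while c:` walk; fuel = number of allocated nodes bounds the acyclic chain
def checkWalk (val : Nat → Option Char) (nxt : Nat → Option Nat) :
    Option Nat → Nat → List Char
  | none, _ => []
  | some _, 0 => []
  | some j, fuel + 1 =>
    match val j with
    | some v => v :: checkWalk val nxt (nxt j) fuel
    | none => checkWalk val nxt (nxt j) fuel  -- unreachable: every chained node has a value

def check (s : String) : String :=
  let st := s.toList.foldl checkStep ((fun _ => none), (fun _ => none), 1, 0, 0)
  String.ofList (checkWalk st.1 st.2.1 (st.2.1 0) st.2.2.1)

-- ===== PORT B =====
def checkAltStep : (List Char × Int) → Char → (List Char × Int)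
  | (lst, i), ch =>
    if ch = '[' then (lst, 0)
    else if ch = ']' then (lst, (lst.length : Int))
    else (PySem.List.insert lst i ch, i + 1)

def check_alt (s : String) : String :=
  String.ofList (s.toList.foldl checkAltStep ([], 0)).1

-- ===== PRECONDITION & SPEC =====
def Spec_check (s : String) (out : String) : Prop := out = check_alt s
instance (s : String) (out : String) : Decidable (Spec_check s out) := by unfold Spec_check; infer_instance

-- ===== CLAIM (what is proved, stated in full; the proofs are below) =====
def Claim_equal_check : Prop := ∀ (s : String), Dom_check s → Spec_check s (check s)

-- ===== LEMMAS AND PROOFS =====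

-- `Chain nxt a js`: starting at node a, following `nxt` visits exactly js and ends at none
def Chain (nxt : Nat → Option Nat) : Nat → List Nat → Prop
  | a, [] => nxt a = none
  | a, k :: ks => nxt a = some k ∧ Chain nxt k ks

-- the simulation invariant between A's heap state and B's (list, index) state
def SimInv (st : (Nat → Option Char) × (Nat → Option Nat) × Nat × Nat × Nat)
    (q : List Char × Int) : Prop :=
  ∃ js : List Nat,
    Chain st.2.1 0 js ∧
    js.map st.1 = q.1.map some ∧
    (∀ j ∈ 0 :: js, j < st.2.2.1) ∧
    (0 :: js).Nodup ∧
    st.2.2.1 = js.length + 1 ∧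
    0 ≤ q.2 ∧ q.2.toNat ≤ js.length ∧
    st.2.2.2.2 = (0 :: js).getD q.2.toNat 0 ∧
    (0 :: js).getLast? = some st.2.2.2.1

theorem chain_shift (nxt nxt' : Nat → Option Nat) :
    ∀ (js : List Nat) (a b : Nat), Chain nxt a js → nxt' b = nxt a →
      (∀ j ∈ js, nxt' j = nxt j) → Chain nxt' b js := by
  intro js
  induction js with
  | nil => intro a b hc hb _; simpa [Chain, hb] using hc
  | cons k ks ih =>
    intro a b hc hb hmem
    refine ⟨by rw [hb]; exact hc.1, ?_⟩
    exact ih k k hc.2 (hmem k (by simp)) (fun j hj => hmem j (by simp [hj]))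

theorem chain_insert (nxt nxt' : Nat → Option Nat) (n cur : Nat)
    (hn : nxt' n = nxt cur) (hcur : nxt' cur = some n)
    (hother : ∀ j, j ≠ n → j ≠ cur → nxt' j = nxt j) :
    ∀ (iN : Nat) (a : Nat) (js : List Nat), Chain nxt a js → iN ≤ js.length →
      cur = (a :: js).getD iN 0 → (∀ j ∈ a :: js, j < n) → (a :: js).Nodup →
      Chain nxt' a (js.take iN ++ n :: js.drop iN) := by
  intro iN
  induction iN with
  | zero =>
    intro a js hc _ hcurv hbound hnd
    simp only [List.getD_cons_zero] at hcurv
    subst hcurv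
    refine ⟨hcur, ?_⟩
    refine chain_shift nxt nxt' js cur n hc hn ?_
    intro j hj
    have hnd' := (List.nodup_cons.mp hnd).1
    exact hother j (Nat.ne_of_lt (hbound j (by simp [hj]))) (fun h => hnd' (h ▸ hj))
  | succ iN ih =>
    intro a js hc hlen hcurv hbound hnd
    cases js with
    | nil => simp at hlen
    | cons k ks =>
      simp only [List.take_succ_cons, List.drop_succ_cons, List.cons_append]
      have hcmem : cur ∈ k :: ks := by
        have : iN ≤ ks.length := by simpa using hlen
        rw [hcurv]
        simp only [List.getD_cons_succ]
        rw [List.getD_eq_getElem _ _ (by simpa using Nat.lt_succ_of_le this)]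
        exact List.getElem_mem _
      have hane : a ≠ cur := by
        intro h; exact (List.nodup_cons.mp hnd).1 (h ▸ hcmem)
      refine ⟨?_, ?_⟩
      · rw [hother a (Nat.ne_of_lt (hbound a (by simp))) hane]; exact hc.1
      · exact ih k ks hc.2 (by simpa using hlen) (by simpa using hcurv)
          (fun j hj => hbound j (by simp [hj])) (List.nodup_cons.mp hnd).2

theorem walk_chain (val : Nat → Option Char) (nxt : Nat → Option Nat) :
    ∀ (js : List Nat) (a : Nat) (lst : List Char) (fuel : Nat),
      Chain nxt a js → js.map val = lst.map some → js.length ≤ fuel →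
      checkWalk val nxt (nxt a) fuel = lst := by
  intro js
  induction js with
  | nil =>
    intro a lst fuel hc hmap _
    have : lst = [] := by cases lst <;> simp_all
    subst this
    simp [Chain] at hc
    simp [checkWalk, hc]
  | cons k ks ih =>
    intro a lst fuel hc hmap hfuel
    cases lst with
    | nil => simp at hmap
    | cons v lst' =>
      cases fuel with
      | zero => simp at hfuel
      | succ f =>
        simp only [List.map_cons, List.cons.injEq] at hmap
        rw [hc.1]
        simp only [checkWalk, hmap.1]
        exact congrArg (v :: ·) (ih k lst' f hc.2 hmap.2 (by simpa using hfuel))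

theorem simInv_step (ch : Char)
    (st : (Nat → Option Char) × (Nat → Option Nat) × Nat × Nat × Nat)
    (q : List Char × Int) (h : SimInv st q) : SimInv (checkStep st ch) (checkAltStep q ch) := by
  obtain ⟨val, nxt, size, tail, cur⟩ := st
  obtain ⟨lst, i⟩ := q
  obtain ⟨js, hc, hmap, hbound, hnd, hsize, hi0, hile, hcur, htail⟩ := h
  dsimp only at hc hmap hbound hsize hi0 hile hcur htail
  have hlstlen : lst.length = js.length := by
    have := congrArg List.length hmap; simpa using this.symm
  by_cases h1 : ch = '['
  · rw [show checkStep (val, nxt, size, tail, cur) ch = (val, nxt, size, tail, 0) from by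
        simp [checkStep, h1],
      show checkAltStep (lst, i) ch = (lst, 0) from by simp [checkAltStep, h1]]
    exact ⟨js, hc, hmap, hbound, hnd, hsize, le_refl _, by simp, by simp, htail⟩
  by_cases h2 : ch = ']'
  · rw [show checkStep (val, nxt, size, tail, cur) ch = (val, nxt, size, tail, tail) from by
        simp [checkStep, h2],
      show checkAltStep (lst, i) ch = (lst, (lst.length : Int)) from by
        simp [checkAltStep, h2]]
    refine ⟨js, hc, hmap, hbound, hnd, hsize, by simp, by simp [hlstlen], ?_, htail⟩
    have htl : (0 :: js).getLast? = (0 :: js)[js.length]? := by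
      rw [List.getLast?_eq_getElem?]; simp
    rw [htl] at htail
    have hlt : js.length < (0 :: js).length := by simp
    rw [List.getElem?_eq_getElem hlt] at htail
    have hnc : ((lst.length : Int)).toNat = js.length := by simp [hlstlen]
    dsimp only
    rw [hnc, List.getD_eq_getElem _ _ hlt]
    exact (Option.some_injective _ htail).symm
  · -- insertion step
    set iN := i.toNat with hiN
    have hieq : (iN : Int) = i := Int.toNat_of_nonneg hi0
    have hfresh : ∀ j ∈ 0 :: js, j ≠ size := fun j hj => Nat.ne_of_lt (hbound j hj)
    have hcurlt : cur < size := by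
      have hmem : cur ∈ 0 :: js := by
        rw [hcur, List.getD_eq_getElem _ _ (by simp; omega)]
        exact List.getElem_mem _
      exact hbound cur hmem
    rw [show checkAltStep (lst, i) ch = (PySem.List.insert lst i ch, i + 1) from by
        simp [checkAltStep, h1, h2],
      show checkStep (val, nxt, size, tail, cur) ch
          = ((fun j => if j = size then some ch else val j),
             (fun j => if j = size then nxt cur else if j = cur then some size else nxt j),
             size + 1, if cur = tail then size else tail, size) from by
        simp [checkStep, h1, h2]]
    refine ⟨js.take iN ++ size :: js.drop iN, ?_, ?_, ?_, ?_, ?_, ?_, ?_, ?_, ?_⟩ <;> dsimp only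
    · -- Chain
      refine chain_insert nxt _ size cur ?_ ?_ ?_ iN 0 js hc hile hcur hbound hnd
      · simp
      · by_cases hcs : cur = size
        · omega
        · simp [hcs]
      · intro j hjn hjc; simp [hjn, hjc]
    · -- values
      rw [show PySem.List.insert lst i ch = lst.take iN ++ ch :: lst.drop iN from by
        rw [← hieq]; exact PySem.List.insert_natCast lst iN ch (by omega)]
      have hval : ∀ j ∈ js, (fun j => if j = size then some ch else val j) j = val j := by
        intro j hj; simp [hfresh j (by simp [hj])]
      simp only [List.map_append, List.map_cons]
      rw [List.map_congr_left (fun j hj => hval j (List.take_subset _ _ hj)),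
          List.map_congr_left (fun j hj => hval j (List.drop_subset _ _ hj)),
          List.map_take, List.map_drop, hmap]
      simp [List.map_take, List.map_drop]
    · -- bounds
      intro j hj
      simp only [List.mem_cons, List.mem_append] at hj
      rcases hj with h | h | h | h
      · omega
      · exact Nat.lt_succ_of_lt (hbound j (by simp [List.take_subset _ _ h]))
      · omega
      · exact Nat.lt_succ_of_lt (hbound j (by simp [List.drop_subset _ _ h]))
    · -- nodup
      have h0 : (0 : Nat) ∈ 0 :: js := by simp
      have hsz0 : size ≠ 0 := fun h => by have := hbound 0 h0; omega
      rw [show (0 : Nat) :: (js.take iN ++ size :: js.drop iN)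
            = (0 :: js.take iN) ++ size :: js.drop iN from by simp]
      rw [List.nodup_middle, List.nodup_cons]
      constructor
      · intro hmem
        have : size ∈ 0 :: js := by
          rcases List.mem_append.mp hmem with h | h
          · rcases List.mem_cons.mp h with h | h
            · exact absurd h hsz0
            · exact List.mem_cons_of_mem _ (List.take_subset _ _ h)
          · exact List.mem_cons_of_mem _ (List.drop_subset _ _ h)
        exact hfresh size this rfl
      · rw [show ((0 : Nat) :: js.take iN) ++ js.drop iN = 0 :: (js.take iN ++ js.drop iN)
            from by simp, List.take_append_drop]
        exact hnd
    · -- size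
      simp; omega
    · omega
    · -- index bound
      have hsn : (i + 1).toNat = iN + 1 := by omega
      rw [hsn]
      simp; omega
    · -- cur' = size at position iN+1
      have hsn : (i + 1).toNat = iN + 1 := by omega
      rw [hsn]
      have hlen : (js.take iN).length = iN := by simp; omega
      simp only [List.getD_cons_succ]
      rw [List.getD_eq_getElem _ _ (by simp; omega)]
      rw [List.getElem_append_right (by omega)]
      simp [hlen]
    · -- tail'
      by_cases hct : cur = tail
      · -- inserting at the end: iN = js.length
        have htl : (0 :: js).getLast? = (0 :: js)[js.length]? := by
          rw [List.getLast?_eq_getElem?]; simp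
        have hlt : js.length < (0 :: js).length := by simp
        have htailv : tail = (0 :: js)[js.length] := by
          rw [htl, List.getElem?_eq_getElem hlt] at htail
          exact (Option.some_injective _ htail).symm
        have hcurv : cur = (0 :: js)[iN]'(by simp; omega) := by
          rw [hcur, List.getD_eq_getElem _ _ (by simp; omega)]
        have hgeq : (0 :: js)[iN]'(by simp; omega) = (0 :: js)[js.length]'hlt := by
          rw [← hcurv, ← htailv, hct]
        have hiNeq : iN = js.length := by simpa using hnd.getElem_inj_iff.mp hgeq
        rw [if_pos hct, hiNeq]
        rw [List.take_of_length_le (le_refl js.length), List.drop_of_length_le (le_refl _)]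
        rw [show (0 : Nat) :: (js ++ [size]) = (0 :: js) ++ [size] from by simp,
          List.getLast?_concat]
      · -- inserting strictly inside: last element unchanged
        have hcurv : cur = (0 :: js)[iN]'(by simp; omega) := by
          rw [hcur, List.getD_eq_getElem _ _ (by simp; omega)]
        have hiNlt : iN < js.length := by
          rcases Nat.lt_or_ge iN js.length with h | h
          · exact h
          · exfalso
            have hiNeq : iN = js.length := by omega
            have htl : (0 :: js).getLast? = (0 :: js)[js.length]? := by
              rw [List.getLast?_eq_getElem?]; simp
            have hlt : js.length < (0 :: js).length := by simp
            rw [htl, List.getElem?_eq_getElem hlt] at htail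
            exact hct (by rw [hcurv, ← Option.some_injective _ htail]; simp [hiNeq])
        have hdropne : js.drop iN ≠ [] := by
          simp [List.drop_eq_nil_iff]; omega
        obtain ⟨d, hd⟩ : ∃ d, (js.drop iN).getLast? = some d := by
          cases h : (js.drop iN).getLast? with
          | none => exact absurd (List.getLast?_eq_none_iff.mp h) hdropne
          | some d => exact ⟨d, rfl⟩
        rw [show (0 : Nat) :: js = (0 :: js.take iN) ++ js.drop iN from by
          simp [List.take_append_drop], List.getLast?_append, hd] at htail
        simp only [Option.some_or] at htail
        rw [if_neg hct]
        rw [show (0 : Nat) :: (js.take iN ++ size :: js.drop iN)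
              = ((0 :: js.take iN) ++ [size]) ++ js.drop iN from by simp,
          List.getLast?_append, hd]
        simpa using htail

theorem simInv_foldl (cs : List Char)
    (st : (Nat → Option Char) × (Nat → Option Nat) × Nat × Nat × Nat)
    (q : List Char × Int) (h : SimInv st q) :
    SimInv (cs.foldl checkStep st) (cs.foldl checkAltStep q) := by
  induction cs generalizing st q with
  | nil => exact h
  | cons c cs ih => exact ih _ _ (simInv_step c st q h)

theorem simInv_init : SimInv ((fun _ => none), (fun _ => none), 1, 0, 0) ([], 0) := by
  exact ⟨[], rfl, rfl, by simp, by simp, rfl, le_refl _, by simp, rfl, rfl⟩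

-- ===== VERDICT (by name: the statement is the Claim_ definition above) =====
theorem check_spec : Claim_equal_check := by
  intro s _
  unfold Spec_check check check_alt
  obtain ⟨js, hc, hmap, _, _, hsize, _⟩ :=
    simInv_foldl s.toList ((fun _ => none), (fun _ => none), 1, 0, 0) ([], 0) simInv_init
  exact congrArg String.ofList (walk_chain _ _ js 0 _ _ hc hmap (by omega))
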